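/-
  jsmn_d.bin: `jsmn_parse_primitive`, second part: the exits.
    prim_tail        100113H: pop rbx ; pop rbp ; ret                                              (3 instructions)
    prim_inval       100116H: parser->pos = start ; return JSMN_ERROR_INVAL                        (3)
    prim_count       1000DEH with tokens == NULL: parser->pos-- ; return 0                         (2 + 4)
    prim_nomem       1000F1H with rax = NULL: parser->pos = start ; return JSMN_ERROR_NOMEM        (3 + 3)
    prim_dec         100107H (after jsmn_fill_token): parser->pos-- ; return 0                     (4)
-/
import Prog.Jsmn.D.PrimLoop

namespace X86
namespace J6
namespace D
open X86.User (CodeAt RegsKept Span FlagsOK Layout toNat_add_ofNat toNat_ofNat_lt' add_ofNat_add)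
open Jsmn JsmnDBytes

set_option maxRecDepth 100000
set_option maxHeartbeats 4000000
set_option linter.unusedSimpArgs false
set_option linter.unusedVariables false

variable {n : User.Layout} {v0 : User.State} {ret pa jsA tb : Word} {js : List UInt8} {numTokens : Nat} {p pc : Parser} {toks tc : Option Tokens}

/-- The epilogue: with the result in eax and the final model state in memory, pop the two saved registers and return. -/
theorem prim_tail (hp : ScanPre binD n binD.prim binD.usePrim v0 ret pa jsA tb js numTokens p toks) {r : Int} {v : User.State}
    (hrip : v.rip = 0x100113) (hrax : v.reg .rax = UInt64.ofNat (u32 r)) (hf : PrimFrame v0 ret pa tb numTokens p toks pc tc v) :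
    Reach n v (ScanPost binD binD.usePrim v0 ret pa tb numTokens toks r pc tc) := by
  v3_open hp.call hf
  j6_bin
  have hcode := JsmnD.tjd_jsmn_parse_primitive_code hf_img
  v3_walk hcode hp.call.fetch [hf_retA, hp_call_retlt]
  refine Reach.done ⟨⟨by simp, by simp, calleeSaved_of_six (by v3_regnorm) (by v3_regnorm) (by v3_regnorm; exact hf_r12) (by v3_regnorm; exact hf_r13)
    (by v3_regnorm; exact hf_r14) (by v3_regnorm; exact hf_r15), ?_⟩, ?_, ?_, ?_⟩
  · unfold dataWins; v3_memnorm; rw [binD_cfg]; exact hf_same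
  · unfold RetInt; v3_regnorm; exact hrax
  · v3_memnorm; exact hf.parser
  · v3_memnorm; rw [binD_cfg]; exact hf_toksArg

set_option hygiene false in
/-- `PrimFrame` for a view reached from `v` (with `v3_open hf` done) by stores into the parser struct: everything but the `parser` field. -/
macro "prim_frame" : tactic => `(tactic|
  refine ⟨by v3_regnorm; exact hf_rbx, by v3_regnorm; exact hf_rbp, by v3_regnorm; exact hf_rsp, by v3_regnorm; exact hf_r12, by v3_regnorm; exact hf_r13,
    by v3_regnorm; exact hf_r14, by v3_regnorm; exact hf_r15, by v3_frame hf_slotRbp, by v3_frame hf_slotRbx, by v3_frame hf_retA,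
    by v3_frame hf_img, ?_, by v3_frame hf_toksArg, hf.tcb, by v3_same⟩)

/-- A character out of range: `parser->pos = start; return JSMN_ERROR_INVAL`. -/
theorem prim_inval (hp : ScanPre binD n binD.prim binD.usePrim v0 ret pa jsA tb js numTokens p toks) {q : Nat} {v : User.State}
    (hrip : v.rip = 0x100116) (hf : PrimFrame v0 ret pa tb numTokens p toks { p with pos := q } toks v) :
    Reach n v (ScanPost binD binD.usePrim v0 ret pa tb numTokens toks JSMN_ERROR_INVAL p toks) := by
  have hW := hp.toksW
  v3_open hp hf hW
  j6_bin
  have hcode := JsmnD.tjd_jsmn_parse_primitive_code hf_img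
  have hplt : p.pos < 2 ^ 32 := hp_parser_pos ▸ User.Mem.readLE4_lt _ _
  v3_walk hcode hp.call.fetch [] until [0x100113]
  refine prim_tail hp (by simp) (by v3_regnorm; rfl) ?_
  prim_frame
  exact ⟨by v3_read, by v3_frame hf_parser_toknext, by v3_frame hf_parser_toksuper⟩

/-- Counting mode (`tokens == NULL`): `parser->pos--; return 0`. -/
theorem prim_count (hp : ScanPre binD n binD.prim binD.usePrim v0 ret pa jsA tb js numTokens p none) {q : Nat} {v : User.State}
    (hrip : v.rip = 0x1000de) (hf : PrimFrame v0 ret pa tb numTokens p none { p with pos := q } none v) (hr : PrimRegs jsA tb js numTokens v)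
    (hrax : v.reg .rax = UInt64.ofNat q) :
    Reach n v (ScanPost binD binD.usePrim v0 ret pa tb numTokens none 0 { p with pos := u32 ((q : Int) - 1) } none) := by
  have hW := hp.toksW
  v3_open hp hf hr hW
  j6_bin
  have hcode := JsmnD.tjd_jsmn_parse_primitive_code hf_img
  have hqlt : q < 2 ^ 32 := hf_parser_pos ▸ User.Mem.readLE4_lt _ _
  have htb : tb = 0 := hf_toksArg
  v3_walk hcode hp.call.fetch [] until [0x100113]
  have hpos : u32 ((q : Int) - 1) = (Word.low .w32 (UInt64.ofNat q - 1)).toNat := by unfold u32; v3_omega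
  refine prim_tail hp (by simp) (by v3_regnorm; rfl) ?_
  prim_frame
  exact ⟨by rw [hpos]; v3_read, by v3_frame hf_parser_toknext, by v3_frame hf_parser_toksuper⟩

/-- No room for the token (`jsmn_alloc_token` returned NULL): `parser->pos = start; return JSMN_ERROR_NOMEM`. -/
theorem prim_nomem (hp : ScanPre binD n binD.prim binD.usePrim v0 ret pa jsA tb js numTokens p toks) {q : Nat} {v : User.State}
    (hrip : v.rip = 0x1000f1) (hf : PrimFrame v0 ret pa tb numTokens p toks { p with pos := q } toks v) (hrax : v.reg .rax = 0) :
    Reach n v (ScanPost binD binD.usePrim v0 ret pa tb numTokens toks JSMN_ERROR_NOMEM p toks) := by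
  have hW := hp.toksW
  v3_open hp hf hW
  j6_bin
  have hcode := JsmnD.tjd_jsmn_parse_primitive_code hf_img
  have hplt : p.pos < 2 ^ 32 := hp_parser_pos ▸ User.Mem.readLE4_lt _ _
  v3_walk hcode hp.call.fetch [] until [0x100113]
  refine prim_tail hp (by simp) (by v3_regnorm; rfl) ?_
  prim_frame
  exact ⟨by v3_read, by v3_frame hf_parser_toknext, by v3_frame hf_parser_toksuper⟩

/-- After `jsmn_fill_token`: `parser->pos--; return 0`. -/
theorem prim_dec (hp : ScanPre binD n binD.prim binD.usePrim v0 ret pa jsA tb js numTokens p toks) {v : User.State}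
    (hrip : v.rip = 0x100107) (hf : PrimFrame v0 ret pa tb numTokens p toks pc tc v) :
    Reach n v (ScanPost binD binD.usePrim v0 ret pa tb numTokens toks 0 { pc with pos := u32 ((pc.pos : Int) - 1) } tc) := by
  have hW := hp.toksW
  v3_open hp hf hW
  j6_bin
  have hcode := JsmnD.tjd_jsmn_parse_primitive_code hf_img
  have hqlt : pc.pos < 2 ^ 32 := hf_parser_pos ▸ User.Mem.readLE4_lt _ _
  v3_walk hcode hp.call.fetch [] until [0x100113]
  have hpos : u32 ((pc.pos : Int) - 1) = (Word.low .w32 (Word.low .w32 (UInt64.ofNat pc.pos) - 1)).toNat := by unfold u32; v3_omega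
  refine prim_tail hp (by simp) (by v3_regnorm; rfl) ?_
  prim_frame
  exact ⟨by rw [hpos]; v3_read, by v3_frame hf_parser_toknext, by v3_frame hf_parser_toksuper⟩

end D
end J6
end X86
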